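-- pv_equiv track=rewrite | github.com/Traigent/Traigent | traigent/api/decorators.py | _augment_constraint_scope_var_names
-- ===== SOURCE A (Python) =====
-- from typing import TYPE_CHECKING, Any, TypeVar, cast
--
-- def _ensure_scope_name(scope_var_names: dict[int, str], name: str) -> None:
--     """Ensure a parameter name appears in scope even without a live object id."""
--     if name in scope_var_names.values():
--         return
--
--     synthetic_id = -1
--     while synthetic_id in scope_var_names:
--         synthetic_id -= 1
--     scope_var_names[synthetic_id] = name
--
-- def _augment_constraint_scope_var_names(
--     scope_var_names: dict[int, str] | None,
--     configuration_space: dict[str, Any] | None,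
-- ) -> dict[int, str] | None:
--     """Augment scope map with normalized configuration-space keys."""
--     if scope_var_names is None and not configuration_space:
--         return None
--
--     merged = dict(scope_var_names or {})
--     for name in configuration_space or {}:
--         if isinstance(name, str):
--             _ensure_scope_name(merged, name)
--     return merged
-- ===== SOURCE B (Python) =====
-- def _augment_constraint_scope_var_names(scope_var_names, configuration_space):
--     """Staged algorithm: (1) collect the genuinely new names, (2) generate that
--     many free negative ids in one descending sweep, (3) bulk-update with zip —
--     no per-name probing or membership rescans."""
--     if scope_var_names is None and not configuration_space:
--         return None
--
--     merged = dict(scope_var_names or {})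
--
--     known = set(merged.values())
--     new_names = []
--     for name in configuration_space or {}:
--         if isinstance(name, str) and name not in known:
--             known.add(name)
--             new_names.append(name)
--
--     keys = set(merged)
--     free = []
--     i = -1
--     while len(free) < len(new_names):
--         if i not in keys:
--             free.append(i)
--         i -= 1
--
--     merged.update(zip(free, new_names))
--     return merged
-- ===== Notes on version B (the rewrite author's own statement) =====
-- stated objective: faster
-- what changed: B is a staged algorithm: one pass filters the genuinely new names, one descending sweep generates exactly that many negative ids free of the original keys, and a single zip bulk-update installs them, replacing A's per-name values() scan and restart-at--1 key probing.
import Mathlib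
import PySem

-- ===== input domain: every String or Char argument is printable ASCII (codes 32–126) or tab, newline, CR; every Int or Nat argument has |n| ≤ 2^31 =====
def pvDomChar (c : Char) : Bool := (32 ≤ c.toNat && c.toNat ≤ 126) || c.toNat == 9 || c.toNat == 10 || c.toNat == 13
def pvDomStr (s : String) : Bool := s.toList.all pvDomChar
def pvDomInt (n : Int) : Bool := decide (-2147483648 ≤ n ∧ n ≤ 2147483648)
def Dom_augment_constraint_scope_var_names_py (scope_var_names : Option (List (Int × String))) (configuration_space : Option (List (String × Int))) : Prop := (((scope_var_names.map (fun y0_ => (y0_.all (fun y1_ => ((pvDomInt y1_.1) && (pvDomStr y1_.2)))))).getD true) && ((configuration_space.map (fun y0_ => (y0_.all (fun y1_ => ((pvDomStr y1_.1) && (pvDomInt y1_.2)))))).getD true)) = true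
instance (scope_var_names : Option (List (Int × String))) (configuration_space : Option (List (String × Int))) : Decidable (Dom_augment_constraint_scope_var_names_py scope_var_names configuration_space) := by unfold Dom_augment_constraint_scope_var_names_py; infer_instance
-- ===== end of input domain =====

-- B replaces A's per-name values()/keys rescans by a staged algorithm: filter the new
-- names, generate that many free negative ids in one sweep, bulk-insert the zip (faster).

-- termination measure for the Python 'while … in …: i -= 1' descending searches
theorem pvFilterLeLenMono (t : List Int) (i : Int) :
    (t.filter (fun k => decide (k ≤ i - 1))).length ≤ (t.filter (fun k => decide (k ≤ i))).length := by
  rw [← List.countP_eq_length_filter, ← List.countP_eq_length_filter]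
  apply List.countP_mono_left
  intro y hy hz; simp at hz ⊢; omega

theorem pvFilterLeLen (l : List Int) (i : Int) (h : i ∈ l) :
    (l.filter (fun k => decide (k ≤ i - 1))).length < (l.filter (fun k => decide (k ≤ i))).length := by
  induction l with
  | nil => cases h
  | cons x xs ih =>
    simp only [List.filter_cons]
    rcases List.mem_cons.1 h with rfl | hm
    · rw [if_neg (by simp), if_pos (by simp)]
      have := pvFilterLeLenMono xs i
      simp only [List.length_cons]
      omega
    · have hlt := ih hm
      by_cases h1 : x ≤ i - 1
      · rw [if_pos (by simpa using h1), if_pos (by simp; omega)]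
        simpa using hlt
      · by_cases h2 : x ≤ i
        · rw [if_neg (by simpa using h1), if_pos (by simpa using h2)]
          simp only [List.length_cons]; omega
        · rw [if_neg (by simpa using h1), if_neg (by simpa using h2)]
          exact hlt

-- ===== PORT A =====
def aFindSyn (d : PySem.Dict Int String) (i : Int) : Int :=
  if h : d.contains i = true then aFindSyn d (i - 1) else i
termination_by (d.keys.filter (fun k => decide (k ≤ i))).length
decreasing_by
  exact pvFilterLeLen d.keys i ((PySem.Dict.contains_iff_mem_keys d i).1 h)

def ensureScopeName (d : PySem.Dict Int String) (name : String) : PySem.Dict Int String :=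
  if name ∈ d.values then d
  else d.insert (aFindSyn d (-1)) name

def augment_constraint_scope_var_names_py (scope_var_names : Option (List (Int × String))) (configuration_space : Option (List (String × Int))) : Option (List (Int × String)) :=
  if scope_var_names = none ∧ configuration_space.getD [] = [] then none
  else
    let merged := PySem.Dict.ofList (scope_var_names.getD [])
    some (((configuration_space.getD []).foldl (fun d p => ensureScopeName d p.1) merged).items)

-- ===== PORT B =====
-- the 'while len(free) < len(new_names): if i not in keys: free.append(i); i -= 1' loop
def bFreeIds (keys : PySem.Set Int) (count : Nat) (i : Int) : List Int :=
  if count = 0 then []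
  else if h : i ∈ keys then bFreeIds keys count (i - 1)
  else i :: bFreeIds keys (count - 1) (i - 1)
termination_by count + (keys.filter (fun k => decide (k ≤ i))).length
decreasing_by
  · have := pvFilterLeLen keys i h; omega
  · have h0 : count ≠ 0 := by assumption
    have := pvFilterLeLenMono keys i
    omega

def augment_constraint_scope_var_names_py_alt (scope_var_names : Option (List (Int × String))) (configuration_space : Option (List (String × Int))) : Option (List (Int × String)) :=
  if scope_var_names = none ∧ configuration_space.getD [] = [] then none
  else
    let merged := PySem.Dict.ofList (scope_var_names.getD [])
    let newNames := ((configuration_space.getD []).foldl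
      (fun (st : PySem.Set String × List String) p =>
        if p.1 ∈ st.1 then st else (st.1.add p.1, st.2 ++ [p.1]))
      (PySem.Set.ofList merged.values, [])).2
    let free := bFreeIds (PySem.Set.ofList merged.keys) newNames.length (-1)
    some (((List.zip free newNames).foldl (fun d kn => d.insert kn.1 kn.2) merged).items)

-- ===== PRECONDITION & SPEC =====
def Spec_augment_constraint_scope_var_names_py (scope_var_names : Option (List (Int × String))) (configuration_space : Option (List (String × Int))) (out : Option (List (Int × String))) : Prop := out = augment_constraint_scope_var_names_py_alt scope_var_names configuration_space
instance (scope_var_names : Option (List (Int × String))) (configuration_space : Option (List (String × Int))) (out : Option (List (Int × String))) : Decidable (Spec_augment_constraint_scope_var_names_py scope_var_names configuration_space out) := by unfold Spec_augment_constraint_scope_var_names_py; infer_instance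

-- ===== CLAIM (what is proved, stated in full; the proofs are below) =====
def Claim_equal_augment_constraint_scope_var_names_py : Prop := ∀ (scope_var_names : Option (List (Int × String))) (configuration_space : Option (List (String × Int))), Dom_augment_constraint_scope_var_names_py scope_var_names configuration_space → Spec_augment_constraint_scope_var_names_py scope_var_names configuration_space (augment_constraint_scope_var_names_py scope_var_names configuration_space)

-- ===== LEMMAS AND PROOFS =====

-- the first id r ≤ s with ¬ cond r (what the descending searches compute)
def FSpec (cond : Int → Prop) (s r : Int) : Prop :=
  r ≤ s ∧ ¬ cond r ∧ ∀ k, r < k → k ≤ s → cond k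

theorem FSpec_unique {cond : Int → Prop} {s r1 r2 : Int}
    (h1 : FSpec cond s r1) (h2 : FSpec cond s r2) : r1 = r2 := by
  obtain ⟨a1, b1, c1⟩ := h1; obtain ⟨a2, b2, c2⟩ := h2
  rcases lt_trichotomy r1 r2 with h | h | h
  · exact absurd (c1 r2 h a2) b2
  · exact h
  · exact absurd (c2 r1 h a1) b1

theorem aFindSyn_fspec (d : PySem.Dict Int String) (s : Int) :
    FSpec (fun k => d.contains k = true) s (aFindSyn d s) := by
  induction s using aFindSyn.induct d with
  | case1 i h ih =>
    rw [aFindSyn, dif_pos h]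
    obtain ⟨a, b, c⟩ := ih
    exact ⟨by omega, b, fun k hk1 hk2 => by
      by_cases hk : k ≤ i - 1
      · exact c k hk1 hk
      · have : k = i := by omega
        subst this; exact h⟩
  | case2 i h =>
    rw [aFindSyn, dif_neg h]
    exact ⟨le_refl _, h, fun k hk1 hk2 => ((by omega : False)).elim⟩

-- proof-only: the first free id ≤ s w.r.t. a fixed key set
def firstFree (keys : PySem.Set Int) (s : Int) : Int :=
  if h : s ∈ keys then firstFree keys (s - 1) else s
termination_by (keys.filter (fun k => decide (k ≤ s))).length
decreasing_by
  exact pvFilterLeLen keys s h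

theorem firstFree_fspec (keys : PySem.Set Int) (s : Int) :
    FSpec (fun k => k ∈ keys) s (firstFree keys s) := by
  induction s using firstFree.induct keys with
  | case1 i h ih =>
    rw [firstFree, dif_pos h]
    obtain ⟨a, b, c⟩ := ih
    exact ⟨by omega, b, fun k hk1 hk2 => by
      by_cases hk : k ≤ i - 1
      · exact c k hk1 hk
      · have : k = i := by omega
        subst this; exact h⟩
  | case2 i h =>
    rw [firstFree, dif_neg h]
    exact ⟨le_refl _, h, fun k hk1 hk2 => ((by omega : False)).elim⟩

-- bFreeIds unfolds one free id at a time
theorem bFreeIds_succ (keys : PySem.Set Int) (c : Nat) (s : Int) :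
    bFreeIds keys (c + 1) s = firstFree keys s :: bFreeIds keys c (firstFree keys s - 1) := by
  induction s using firstFree.induct keys with
  | case1 i h ih =>
    rw [bFreeIds, if_neg (by omega), dif_pos h, firstFree, dif_pos h]
    exact ih
  | case2 i h =>
    rw [bFreeIds, if_neg (by omega), dif_neg h, firstFree, dif_neg h]
    simp

-- proof-only: the list of new names A will add, from a given seen-set
def collectNew (seen : PySem.Set String) : List (String × Int) → List String
  | [] => []
  | p :: t => if p.1 ∈ seen then collectNew seen t else p.1 :: collectNew (seen.add p.1) t

-- B's accumulator pass computes collectNew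
theorem collect_fold (l : List (String × Int)) (seen : PySem.Set String) (acc : List String) :
    (l.foldl (fun (st : PySem.Set String × List String) p =>
        if p.1 ∈ st.1 then st else (st.1.add p.1, st.2 ++ [p.1])) (seen, acc)).2
      = acc ++ collectNew seen l := by
  induction l generalizing seen acc with
  | nil => simp [collectNew]
  | cons p t ih =>
    by_cases h : p.1 ∈ seen
    · simp [collectNew, h, ih]
    · simp [collectNew, h, ih, List.append_assoc]

-- the loop invariant tying (dict, seen-set, pointer) to the original key set
def pvInv (keys0 : PySem.Set Int) (d : PySem.Dict Int String) (seen : PySem.Set String) (ptr : Int) : Prop :=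
  (∀ s : String, s ∈ seen ↔ s ∈ d.values) ∧
  ptr ≤ -1 ∧
  (∀ k : Int, ptr < k → k ≤ -1 → d.contains k = true) ∧
  (∀ k : Int, k ≤ ptr → (d.contains k = true ↔ k ∈ keys0))

-- core: A's sequential fold equals B's zip-insert of the staged lists
theorem pvMain (keys0 : PySem.Set Int) (l : List (String × Int))
    (d : PySem.Dict Int String) (seen : PySem.Set String) (ptr : Int)
    (h : pvInv keys0 d seen ptr) :
    l.foldl (fun d p => ensureScopeName d p.1) d
      = (List.zip (bFreeIds keys0 (collectNew seen l).length ptr) (collectNew seen l)).foldl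
          (fun d kn => d.insert kn.1 kn.2) d := by
  induction l generalizing d seen ptr with
  | nil => simp [collectNew]
  | cons p t ih =>
    obtain ⟨hseen, hptr, hmid, hlow⟩ := h
    by_cases hn : p.1 ∈ seen
    · have hv : p.1 ∈ d.values := (hseen p.1).1 hn
      simp only [List.foldl_cons, collectNew, if_pos hn, ensureScopeName, if_pos hv]
      exact ih d seen ptr ⟨hseen, hptr, hmid, hlow⟩
    · have hv : p.1 ∉ d.values := fun hv => hn ((hseen p.1).2 hv)
      set f := firstFree keys0 ptr with hf
      obtain ⟨hfle, hfnot, hfall⟩ := firstFree_fspec keys0 ptr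
      rw [← hf] at hfle hfnot hfall
      have hfnc : d.contains f = false := by
        have := hlow f hfle
        cases hc : d.contains f
        · rfl
        · exact absurd (this.1 hc) hfnot
      have haspec : FSpec (fun k => d.contains k = true) (-1) f := by
        refine ⟨by omega, by simp [hfnc], fun k hk1 hk2 => ?_⟩
        by_cases hkp : k ≤ ptr
        · exact (hlow k hkp).2 (hfall k hk1 hkp)
        · exact hmid k (by omega) hk2
      have ha : aFindSyn d (-1) = f := FSpec_unique (aFindSyn_fspec d (-1)) haspec
      have hinv' : pvInv keys0 (d.insert f p.1) (seen.add p.1) (f - 1) := by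
        refine ⟨?_, by omega, ?_, ?_⟩
        · intro s
          rw [PySem.Set.mem_add]
          have hvals : (d.insert f p.1).values = d.values ++ [p.1] := by
            have := PySem.Dict.items_insert_of_not_contains d p.1 hfnc
            simp [PySem.Dict.values, this]
          rw [hvals]
          simp [hseen s, or_comm]
        · intro k hk1 hk2
          rw [PySem.Dict.contains_insert]
          by_cases hkf : k = f
          · simp [hkf]
          · simp only [Bool.or_eq_true, beq_iff_eq, hkf, false_or]
            by_cases hkp : k ≤ ptr
            · exact (hlow k hkp).2 (hfall k (by omega) hkp)
            · exact hmid k (by omega) hk2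
        · intro k hk
          rw [PySem.Dict.contains_insert]
          have hkf : k ≠ f := by omega
          simp only [Bool.or_eq_true, beq_iff_eq, hkf, false_or]
          exact hlow k (by omega)
      simp only [List.foldl_cons, collectNew, if_neg hn, List.length_cons]
      rw [bFreeIds_succ, ← hf, List.zip_cons_cons, List.foldl_cons]
      simp only [ensureScopeName, if_neg hv, ha]
      exact ih (d.insert f p.1) (seen.add p.1) (f - 1) hinv'

-- ===== VERDICT (by name: the statement is the Claim_ definition above) =====
theorem augment_constraint_scope_var_names_py_spec : Claim_equal_augment_constraint_scope_var_names_py := by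
  intro svn cfg _
  unfold Spec_augment_constraint_scope_var_names_py
  unfold augment_constraint_scope_var_names_py augment_constraint_scope_var_names_py_alt
  by_cases hc : svn = none ∧ cfg.getD [] = []
  · simp [hc]
  · simp only [if_neg hc]
    congr 1
    set merged := PySem.Dict.ofList (svn.getD []) with hm
    have hinv : pvInv (PySem.Set.ofList merged.keys) merged (PySem.Set.ofList merged.values) (-1) := by
      refine ⟨fun s => PySem.Set.mem_ofList _ _, le_refl _, fun k h1 h2 => by omega, fun k _ => ?_⟩
      rw [PySem.Set.mem_ofList]
      exact PySem.Dict.contains_iff_mem_keys merged k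
    rw [pvMain _ _ _ _ _ hinv]
    rw [collect_fold (cfg.getD []) (PySem.Set.ofList merged.values) []]
    simp
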